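-- pv_equiv track=rewrite | github.com/Valentino1994/dayAlgorithm | onedayAlgorithm/2022/Test/LineSummerInternship/t2.py | solution
-- ===== SOURCE A (Python) =====
-- def solution(n, times):
--     answer = 0
--     if n == 1:
--         return answer
--
--     DP = [0] * (n + 1)
--     # when we start to cut, we should cut from a one line.
--     DP[2] = times[0]
--
--     for i in range(2, n+1):
--         # If the i is an odd number, there is only one way to make it
--         if i % 2 != 0:
--             DP[i] = DP[i-1] + times[0]
--             continue
--         # If the i is not an odd number, there is two ways to make it
--         # I should to choice the min value from that
--         DP[i] = min(DP[i-1]+times[0], DP[i//2]+times[i//2-1])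
--
--     answer = DP[n]
--
--     return answer
-- ===== SOURCE B (Python) =====
-- def solution(n, times):
--     # Half-size DP over even line-counts only: half[m] = min cost to build 2*m lines.
--     if n <= 1:
--         return 0
--     t0 = times[0]
--     half = [0, t0]
--     for m in range(2, n // 2 + 1):
--         via_add = half[m - 1] + 2 * t0
--         base = half[m // 2] if m % 2 == 0 else half[m // 2] + t0
--         via_double = base + times[m - 1]
--         half.append(min(via_add, via_double))
--     return half[n // 2] + (n % 2) * t0
-- ===== Notes on version B (the rewrite author's own statement) =====
-- stated objective: alternative
-- what changed: B replaces A's full DP table over every line-count 2..n with a half-size recurrence over even counts only (half[m] = cost of 2*m lines, odd counts folded in as +times[0]), appending to a growing list and reconstructing odd n at the end.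
import Mathlib
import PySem

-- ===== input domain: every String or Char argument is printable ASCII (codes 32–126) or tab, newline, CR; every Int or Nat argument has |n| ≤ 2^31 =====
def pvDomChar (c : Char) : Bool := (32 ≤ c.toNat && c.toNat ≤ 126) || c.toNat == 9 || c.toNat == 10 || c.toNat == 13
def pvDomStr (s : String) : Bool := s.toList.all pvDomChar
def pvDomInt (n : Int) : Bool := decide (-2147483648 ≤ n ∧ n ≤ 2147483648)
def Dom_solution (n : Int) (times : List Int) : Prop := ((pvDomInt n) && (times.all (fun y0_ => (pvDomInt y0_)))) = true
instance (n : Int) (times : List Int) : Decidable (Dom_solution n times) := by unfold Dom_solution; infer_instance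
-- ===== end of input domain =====

-- B replaces A's full DP table over 2..n by a half-size table over even line-counts only
-- (half[m] = cost of 2*m lines; odd counts folded in as +times[0]); an alternative decomposition of the same recurrence.

-- ===== PORT A =====
def solution (n : Int) (times : List Int) : Int :=
  let answer : Int := 0
  if n = 1 then answer
  else
    let DP := PySem.List.pyRepeat [(0 : Int)] (n + 1)
    let DP := PySem.List.pySetD DP 2 (PySem.List.pyGetD times 0 0)
    let DP := (PySem.List.pyRange 2 (n + 1) 1).foldl (fun DP i =>
        if PySem.Int.mod i 2 ≠ 0 then
          PySem.List.pySetD DP i (PySem.List.pyGetD DP (i - 1) 0 + PySem.List.pyGetD times 0 0)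
        else
          PySem.List.pySetD DP i (min (PySem.List.pyGetD DP (i - 1) 0 + PySem.List.pyGetD times 0 0)
            (PySem.List.pyGetD DP (PySem.Int.floordiv i 2) 0 +
              PySem.List.pyGetD times (PySem.Int.floordiv i 2 - 1) 0))) DP
    PySem.List.pyGetD DP n 0

-- ===== PORT B =====
def solution_alt (n : Int) (times : List Int) : Int :=
  if n ≤ 1 then 0
  else
    let t0 := PySem.List.pyGetD times 0 0
    let half : List Int := [0, t0]
    let half := (PySem.List.pyRange 2 (PySem.Int.floordiv n 2 + 1) 1).foldl (fun half m =>
        let viaAdd := PySem.List.pyGetD half (m - 1) 0 + 2 * t0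
        let base := if PySem.Int.mod m 2 = 0 then
            PySem.List.pyGetD half (PySem.Int.floordiv m 2) 0
          else
            PySem.List.pyGetD half (PySem.Int.floordiv m 2) 0 + t0
        let viaDouble := base + PySem.List.pyGetD times (m - 1) 0
        half ++ [min viaAdd viaDouble]) half
    PySem.List.pyGetD half (PySem.Int.floordiv n 2) 0 + PySem.Int.mod n 2 * t0

-- ===== PRECONDITION & SPEC =====
-- Pre_ admits exactly the inputs where Python A returns: n == 1, or n ≥ 2 with
-- len(times) ≥ n // 2 (otherwise A raises IndexError on DP[2] or times[i//2-1]).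
def Pre_solution (n : Int) (times : List Int) : Prop :=
  n = 1 ∨ (2 ≤ n ∧ PySem.Int.floordiv n 2 ≤ (times.length : Int))
instance (n : Int) (times : List Int) : Decidable (Pre_solution n times) := by
  unfold Pre_solution; infer_instance

def pvWitness_solution : Int × List Int := (4, [1, 2])

def Spec_solution (n : Int) (times : List Int) (out : Int) : Prop := out = solution_alt n times
instance (n : Int) (times : List Int) (out : Int) : Decidable (Spec_solution n times out) := by
  unfold Spec_solution; infer_instance

-- ===== CLAIM (what is proved, stated in full; the proofs are below) =====
def Claim_equal_solution : Prop := ∀ (n : Int) (times : List Int),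
  Dom_solution n times → Pre_solution n times → Spec_solution n times (solution n times)

-- ===== LEMMAS AND PROOFS =====

-- Reference recurrence: F t0 times i = A's DP[i].
def F (t0 : Int) (times : List Int) : Nat → Int
  | 0 => 0
  | 1 => 0
  | i + 2 =>
      if (i + 2) % 2 = 1 then F t0 times (i + 1) + t0
      else min (F t0 times (i + 1) + t0)
        (F t0 times ((i + 2) / 2) + times.getD ((i + 2) / 2 - 1) 0)

theorem F_odd (t0 : Int) (times : List Int) (i : Nat) (h2 : 2 ≤ i) (h : i % 2 = 1) :
    F t0 times i = F t0 times (i - 1) + t0 := by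
  obtain ⟨k, rfl⟩ : ∃ k, i = k + 2 := ⟨i - 2, by omega⟩
  simp only [F, h, if_true]
  congr 1

theorem F_even (t0 : Int) (times : List Int) (i : Nat) (h2 : 2 ≤ i) (h : i % 2 = 0) :
    F t0 times i = min (F t0 times (i - 1) + t0)
      (F t0 times (i / 2) + times.getD (i / 2 - 1) 0) := by
  obtain ⟨k, rfl⟩ : ∃ k, i = k + 2 := ⟨i - 2, by omega⟩
  have e1 : k + 2 - 1 = k + 1 := by omega
  rw [e1]
  simp only [F]
  rw [if_neg (by omega)]

-- one even step of the half-size recurrence equals two steps of F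
theorem F_step (t0 : Int) (times : List Int) (h : Nat) (hh : 1 ≤ h) :
    F t0 times (2 * (h + 1)) =
      min (F t0 times (2 * h) + 2 * t0)
        ((if (h + 1) % 2 = 0 then F t0 times (2 * ((h + 1) / 2))
          else F t0 times (2 * ((h + 1) / 2)) + t0) + times.getD h 0) := by
  have he := F_even t0 times (2 * (h + 1)) (by omega) (by omega)
  have e1 : 2 * (h + 1) - 1 = 2 * h + 1 := by omega
  have e2 : 2 * (h + 1) / 2 = h + 1 := by omega
  have e3 : h + 1 - 1 = h := by omega
  rw [e1, e2, e3] at he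
  rw [he, F_odd t0 times (2 * h + 1) (by omega) (by omega)]
  have e4 : 2 * h + 1 - 1 = 2 * h := by omega
  rw [e4]
  have e5 : F t0 times (2 * h) + t0 + t0 = F t0 times (2 * h) + 2 * t0 := by ring
  rw [e5]
  by_cases hp : (h + 1) % 2 = 0
  · have : 2 * ((h + 1) / 2) = h + 1 := by omega
    rw [if_pos hp, this]
  · rw [if_neg hp]
    have h2 : 2 ≤ h + 1 := by omega
    rw [F_odd t0 times (h + 1) h2 (by omega), e3]
    have : 2 * ((h + 1) / 2) = h := by omega
    rw [this]

theorem set_map_range (f : Nat → Int) (m k : Nat) (v : Int) (_hk : k < m) :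
    ((List.range m).map f).set k v = (List.range m).map (fun j => if j = k then v else f j) := by
  apply List.ext_getElem
  · simp
  · intro i h1 h2
    simp only [List.length_map, List.length_range] at h2
    simp [List.getElem_set, List.getElem_map, List.getElem_range]
    split_ifs with a b c <;> first | rfl | omega

-- B-side loop invariant: after processing m = 2..h the list is [F 0, F 2, …, F 2h]
theorem B_inv (times : List Int) (t0 : Int) (ht0 : t0 = times.getD 0 0) (h : Nat)
    (hh : 1 ≤ h) :
    (PySem.List.pyRange 2 ((h : Int) + 1) 1).foldl (fun half m =>
        let viaAdd := PySem.List.pyGetD half (m - 1) 0 + 2 * t0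
        let base := if PySem.Int.mod m 2 = 0 then
            PySem.List.pyGetD half (PySem.Int.floordiv m 2) 0
          else
            PySem.List.pyGetD half (PySem.Int.floordiv m 2) 0 + t0
        let viaDouble := base + PySem.List.pyGetD times (m - 1) 0
        half ++ [min viaAdd viaDouble]) [0, t0]
      = (List.range (h + 1)).map (fun k => F t0 times (2 * k)) := by
  induction h, hh using Nat.le_induction with
  | base =>
      have hb : ((1 : Nat) : Int) + 1 = 2 := by norm_num
      rw [hb, PySem.List.pyRange_one_eq_nil (by norm_num)]
      have : (List.range 2) = [0, 1] := by decide
      rw [this]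
      simp [F, ht0]
  | succ h hh ih =>
      have hone : (2 : Int) ≤ ((h + 1 : Nat) : Int) := by omega
      have hsplit := PySem.List.pyRange_one_succ_right hone
      push_cast at hsplit ⊢
      rw [hsplit, List.foldl_append]
      have hcast : (h : Int) + 1 = ((h + 1 : Nat) : Int) := by push_cast; ring
      rw [ih, List.foldl_cons, List.foldl_nil]
      -- normalise the Int index arithmetic to Nat casts
      have hm1 : (h : Int) + 1 - 1 = ((h : Nat) : Int) := by ring
      have hmod : PySem.Int.mod ((h + 1 : Nat) : Int) 2 = (((h + 1) % 2 : Nat) : Int) := by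
        exact_mod_cast PySem.Int.mod_natCast (h + 1) 2
      have hflo : PySem.Int.floordiv ((h + 1 : Nat) : Int) 2 = (((h + 1) / 2 : Nat) : Int) := by
        exact_mod_cast PySem.Int.floordiv_natCast (h + 1) 2
      rw [hm1, hcast, hmod, hflo,
        PySem.List.pyGetD_natCast, PySem.List.pyGetD_natCast, PySem.List.pyGetD_natCast]
      rw [PySem.List.getD_map_range _ _ _ _ (by omega),
        PySem.List.getD_map_range _ _ _ _ (by omega : (h + 1) / 2 < h + 1)]
      conv_rhs => rw [List.range_succ, List.map_append]
      congr 1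
      simp only [List.map_cons, List.map_nil]
      congr 1
      rw [F_step t0 times h hh]
      have hc : (((h + 1) % 2 : Nat) : Int) = 0 ↔ (h + 1) % 2 = 0 := by
        constructor <;> intro hx <;> omega
      by_cases hp : (h + 1) % 2 = 0
      · rw [if_pos (by exact_mod_cast hc.mpr hp), if_pos hp]
      · rw [if_neg (by exact_mod_cast fun hx => hp (hc.mp hx)), if_neg hp]

theorem solution_alt_eq_F (n : Int) (times : List Int) (hn : 2 ≤ n) :
    solution_alt n times = F (times.getD 0 0) times n.toNat := by
  have hnot : ¬ n ≤ 1 := by omega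
  unfold solution_alt
  rw [if_neg hnot]
  simp only [PySem.List.pyGetD_zero]
  set t0 := times.getD 0 0 with ht0
  set N : Nat := n.toNat with hN
  have hn2 : n = (N : Int) := by omega
  set h : Nat := N / 2 with hhdef
  have hh1 : 1 ≤ h := by omega
  have hfd : PySem.Int.floordiv n 2 = ((h : Nat) : Int) := by
    rw [hn2]
    have : ((2 : Nat) : Int) = 2 := by norm_num
    rw [← this, PySem.Int.floordiv_natCast]
  rw [hfd, B_inv times t0 ht0 h hh1, PySem.List.pyGetD_natCast,
    PySem.List.getD_map_range _ _ _ _ (by omega : h < h + 1)]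
  have hmd : PySem.Int.mod n 2 = ((N % 2 : Nat) : Int) := by
    rw [hn2]
    have : ((2 : Nat) : Int) = 2 := by norm_num
    rw [← this, PySem.Int.mod_natCast]
  rw [hmd]
  by_cases hp : N % 2 = 0
  · have : 2 * h = N := by omega
    rw [this, hp]
    push_cast
    ring
  · have hN1 : N % 2 = 1 := by omega
    rw [hN1, F_odd t0 times N (by omega) hN1]
    have : N - 1 = 2 * h := by omega
    rw [this]
    push_cast
    ring

-- A-side: the initial table [0,…,0] with DP[2] = times[0]
theorem A_init (t0 : Int) (times : List Int) (N : Nat) (_h : 2 ≤ N) :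
    (List.replicate (N + 1) (0 : Int)).set 2 t0
      = (List.range (N + 1)).map
          (fun k => if k ≤ 1 then F t0 times k else if k = 2 then t0 else 0) := by
  apply List.ext_getElem
  · simp
  · intro i h1 h2
    simp only [List.length_map, List.length_range] at h2
    simp [List.getElem_set, List.getElem_map, List.getElem_range, List.getElem_replicate]
    rcases Nat.lt_or_ge i 2 with hi | hi
    · interval_cases i <;> simp [F]
    · by_cases hi2 : i = 2 <;> simp [hi2] <;> omega

-- A-side loop invariant: after processing i = 2..j, DP[k] = F k for k ≤ j
theorem A_inv (times : List Int) (t0 : Int) (ht0 : t0 = times.getD 0 0) (N : Nat)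
    (_hN : 2 ≤ N) (j : Nat) (hj1 : 1 ≤ j) (hjN : j ≤ N) :
    (PySem.List.pyRange 2 ((j : Int) + 1) 1).foldl (fun DP i =>
        if PySem.Int.mod i 2 ≠ 0 then
          PySem.List.pySetD DP i (PySem.List.pyGetD DP (i - 1) 0 + times.getD 0 0)
        else
          PySem.List.pySetD DP i (min (PySem.List.pyGetD DP (i - 1) 0 + times.getD 0 0)
            (PySem.List.pyGetD DP (PySem.Int.floordiv i 2) 0 +
              PySem.List.pyGetD times (PySem.Int.floordiv i 2 - 1) 0)))
      ((List.range (N + 1)).map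
        (fun k => if k ≤ 1 then F t0 times k else if k = 2 then t0 else 0))
      = (List.range (N + 1)).map
          (fun k => if k ≤ j then F t0 times k else if k = 2 then t0 else 0) := by
  induction j, hj1 using Nat.le_induction with
  | base =>
      have hb : ((1 : Nat) : Int) + 1 = 2 := by norm_num
      rw [hb, PySem.List.pyRange_one_eq_nil (by norm_num)]
      rfl
  | succ j hj ih =>
      have hone : (2 : Int) ≤ ((j + 1 : Nat) : Int) := by omega
      have hsplit := PySem.List.pyRange_one_succ_right hone
      push_cast at hsplit ⊢
      rw [hsplit, List.foldl_append, ih (by omega), List.foldl_cons, List.foldl_nil]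
      have hm1 : (j : Int) + 1 - 1 = ((j : Nat) : Int) := by ring
      have hcast : (j : Int) + 1 = ((j + 1 : Nat) : Int) := by push_cast; ring
      have hmod : PySem.Int.mod ((j + 1 : Nat) : Int) 2 = (((j + 1) % 2 : Nat) : Int) := by
        exact_mod_cast PySem.Int.mod_natCast (j + 1) 2
      have hflo : PySem.Int.floordiv ((j + 1 : Nat) : Int) 2 = (((j + 1) / 2 : Nat) : Int) := by
        exact_mod_cast PySem.Int.floordiv_natCast (j + 1) 2
      rw [hm1, hcast, hmod, hflo,
        PySem.List.pyGetD_natCast, PySem.List.pyGetD_natCast, PySem.List.pySetD_natCast]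
      have hq1 : 1 ≤ (j + 1) / 2 := by omega
      have hqc : (((j + 1) / 2 : Nat) : Int) - 1 = (((j + 1) / 2 - 1 : Nat) : Int) := by omega
      rw [hqc, PySem.List.pyGetD_natCast]
      rw [PySem.List.getD_map_range _ _ _ _ (by omega : j < N + 1),
        PySem.List.getD_map_range _ _ _ _ (by omega : (j + 1) / 2 < N + 1)]
      simp only [PySem.List.pySetD_natCast]
      have gj : (if j ≤ j then F t0 times j else if j = 2 then t0 else 0) = F t0 times j :=
        if_pos (le_refl j)
      have gq : (if (j + 1) / 2 ≤ j then F t0 times ((j + 1) / 2)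
            else if (j + 1) / 2 = 2 then t0 else 0) = F t0 times ((j + 1) / 2) :=
        if_pos (by omega)
      rw [gj, gq]
      have e : j + 1 - 1 = j := by omega
      have hc : ((((j + 1) % 2 : Nat) : Int) ≠ 0) ↔ ((j + 1) % 2 = 1) := by
        constructor <;> intro hx <;> omega
      by_cases hp : (j + 1) % 2 = 1
      · rw [if_pos (hc.mpr hp), set_map_range _ _ _ _ (by omega : j + 1 < N + 1)]
        apply List.map_congr_left
        intro k hk
        simp only [List.mem_range] at hk
        by_cases hkj : k = j + 1
        · subst hkj
          rw [if_pos rfl, if_pos (le_refl (j + 1)),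
            F_odd t0 times (j + 1) (by omega) hp, e, ht0]
        · rw [if_neg hkj]
          by_cases hkle : k ≤ j
          · rw [if_pos hkle, if_pos (by omega)]
          · rw [if_neg hkle, if_neg (by omega : ¬ k ≤ j + 1)]
      · rw [if_neg (fun hx => hp (hc.mp hx)), set_map_range _ _ _ _ (by omega : j + 1 < N + 1)]
        apply List.map_congr_left
        intro k hk
        simp only [List.mem_range] at hk
        by_cases hkj : k = j + 1
        · subst hkj
          rw [if_pos rfl, if_pos (le_refl (j + 1)),
            F_even t0 times (j + 1) (by omega) (by omega), e, ht0]
        · rw [if_neg hkj]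
          by_cases hkle : k ≤ j
          · rw [if_pos hkle, if_pos (by omega)]
          · rw [if_neg hkle, if_neg (by omega : ¬ k ≤ j + 1)]

theorem solution_eq_F (n : Int) (times : List Int) (hn : 2 ≤ n) :
    solution n times = F (times.getD 0 0) times n.toNat := by
  have hnot : ¬ n = 1 := by omega
  unfold solution
  rw [if_neg hnot]
  simp only [PySem.List.pyGetD_zero, PySem.List.pyRepeat_singleton]
  set t0 := times.getD 0 0 with ht0
  set N : Nat := n.toNat with hN
  have hn2 : n = (N : Int) := by omega
  have hrep : (n + 1).toNat = N + 1 := by omega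
  rw [hrep]
  have hset : PySem.List.pySetD (List.replicate (N + 1) (0 : Int)) 2 t0
      = (List.range (N + 1)).map
          (fun k => if k ≤ 1 then F t0 times k else if k = 2 then t0 else 0) := by
    have h2 : (2 : Int) = ((2 : Nat) : Int) := by norm_num
    rw [h2, PySem.List.pySetD_natCast, A_init t0 times N (by omega)]
  rw [hset]
  have hb : n + 1 = ((N : Nat) : Int) + 1 := by omega
  rw [hb, hn2, A_inv times t0 ht0 N (by omega) N (by omega) (le_refl N),
    PySem.List.pyGetD_natCast, PySem.List.getD_map_range _ _ _ _ (by omega : N < N + 1),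
    if_pos (le_refl N)]

-- ===== VERDICT (by name: the statement is the Claim_ definition above) =====
theorem solution_spec : Claim_equal_solution := by
  intro n times _ hpre
  unfold Spec_solution
  rcases hpre with h1 | ⟨h2, _⟩
  · subst h1
    show solution 1 times = solution_alt 1 times
    unfold solution solution_alt
    norm_num
  · rw [solution_eq_F n times h2, solution_alt_eq_F n times h2]
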